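-- pv_equiv track=rewrite | github.com/FIvER4IK/snptmt | lib/snptmt.py | find_base_clusters_old_version
-- ===== SOURCE A (Python) =====
-- def find_base_clusters_old_version(cluster_dict_prev, cluster_dict):
--     base_clusters = {}
--
--     for new_cluster_id, new_cluster in cluster_dict.items():
--         max_intersection = []
--         base_cluster_id = None
--
--         for old_cluster_id, old_cluster in cluster_dict_prev.items():
--             intersection = list(set(old_cluster) & set(new_cluster))
--             if len(intersection) > len(max_intersection):
--                 max_intersection = intersection
--                 base_cluster_id = old_cluster_id
--
--         if base_cluster_id is not None:
--             base_clusters[base_cluster_id] = new_cluster_id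
--
--     return list(base_clusters.items())
-- ===== SOURCE B (Python) =====
-- def find_base_clusters_old_version(cluster_dict_prev, cluster_dict):
--     # Inverted index: element -> positions (in insertion order) of the previous
--     # clusters that contain it; overlap sizes are then tallied per position, so
--     # no pairwise set intersections are ever built.
--     index = {}
--     prev_ids = []
--     for old_id, old_cluster in cluster_dict_prev.items():
--         pos = len(prev_ids)
--         for x in dict.fromkeys(old_cluster):
--             index.setdefault(x, []).append(pos)
--         prev_ids.append(old_id)
--
--     n = len(prev_ids)
--     base_clusters = {}
--     for new_id, new_cluster in cluster_dict.items():
--         counts = [0] * n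
--         for x in dict.fromkeys(new_cluster):
--             for p in index.get(x, ()):
--                 counts[p] += 1
--         best_count = 0
--         best_pos = None
--         for p in range(n):
--             if counts[p] > best_count:
--                 best_count = counts[p]
--                 best_pos = p
--         if best_pos is not None:
--             base_clusters[prev_ids[best_pos]] = new_id
--     return list(base_clusters.items())
-- ===== Notes on version B (the rewrite author's own statement) =====
-- stated objective: faster
-- what changed: Replaces A's per-(new,old) pairwise set intersections by an inverted index from element to the positions of the previous clusters containing it, built once; each new cluster then tallies overlap counts through the index and picks the first position with the maximal count, so the work is proportional to element-membership incidences instead of pairs-of-clusters times cluster size.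
import Mathlib
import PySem

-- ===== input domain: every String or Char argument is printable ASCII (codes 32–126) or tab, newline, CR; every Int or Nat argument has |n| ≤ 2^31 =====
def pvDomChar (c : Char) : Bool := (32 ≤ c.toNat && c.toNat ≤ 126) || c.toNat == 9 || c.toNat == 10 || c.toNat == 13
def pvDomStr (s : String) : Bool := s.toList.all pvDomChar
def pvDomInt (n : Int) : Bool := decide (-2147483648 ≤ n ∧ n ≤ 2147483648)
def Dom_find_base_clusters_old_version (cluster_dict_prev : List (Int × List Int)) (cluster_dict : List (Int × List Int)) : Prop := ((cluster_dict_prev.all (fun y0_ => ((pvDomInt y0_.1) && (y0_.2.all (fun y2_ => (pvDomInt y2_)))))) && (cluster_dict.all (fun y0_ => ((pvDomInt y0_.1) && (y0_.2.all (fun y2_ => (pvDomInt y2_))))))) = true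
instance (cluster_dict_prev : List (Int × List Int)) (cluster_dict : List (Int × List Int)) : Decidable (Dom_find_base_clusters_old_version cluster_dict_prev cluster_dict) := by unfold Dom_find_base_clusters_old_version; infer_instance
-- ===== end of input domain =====

-- B replaces A's per-pair set intersections by an inverted index (element → positions of
-- previous clusters) with per-new-cluster overlap tallies: a different, measured-faster
-- algorithm. Return-value equivalence; neither version mutates its arguments.

-- ===== PORT A =====
def find_base_clusters_old_version (cluster_dict_prev : List (Int × List Int)) (cluster_dict : List (Int × List Int)) : List (Int × Int) :=
  let base := cluster_dict.foldl (fun base nc =>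
    let r := cluster_dict_prev.foldl
      (fun (st : List Int × Option Int) oc =>
        let inter : List Int := PySem.Set.inter (PySem.Set.ofList oc.2) (PySem.Set.ofList nc.2)
        if st.1.length < inter.length then (inter, some oc.1) else st)
      ([], none)
    match r.2 with
    | some b => base.insert b nc.1
    | none => base) PySem.Dict.empty
  base.items

-- ===== PORT B =====
def find_base_clusters_old_version_alt (cluster_dict_prev : List (Int × List Int)) (cluster_dict : List (Int × List Int)) : List (Int × Int) :=
  let st := cluster_dict_prev.foldl
    (fun (st : PySem.Dict Int (List Nat) × List Int) oc =>
      let pos := st.2.length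
      let index := (PySem.List.dedup oc.2).foldl
        (fun ix x => ix.modify x [] (fun l => l ++ [pos])) st.1
      (index, st.2 ++ [oc.1]))
    (PySem.Dict.empty, [])
  let index := st.1
  let prev_ids := st.2
  let n := prev_ids.length
  let base := cluster_dict.foldl (fun base nc =>
    let counts := (PySem.List.dedup nc.2).foldl
      (fun cs x => (index.getD x []).foldl (fun cs q => cs.set q (cs.getD q 0 + 1)) cs)
      (List.replicate n 0)
    let sel := (List.range n).foldl
      (fun (st : Nat × Option Nat) p =>
        if st.1 < counts.getD p 0 then (counts.getD p 0, some p) else st)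
      (0, none)
    match sel.2 with
    | some p => base.insert (prev_ids.getD p 0) nc.1
    | none => base) PySem.Dict.empty
  base.items

-- ===== PRECONDITION & SPEC =====
def Spec_find_base_clusters_old_version (cluster_dict_prev : List (Int × List Int)) (cluster_dict : List (Int × List Int)) (out : List (Int × Int)) : Prop := out = find_base_clusters_old_version_alt cluster_dict_prev cluster_dict
instance (cluster_dict_prev : List (Int × List Int)) (cluster_dict : List (Int × List Int)) (out : List (Int × Int)) : Decidable (Spec_find_base_clusters_old_version cluster_dict_prev cluster_dict out) := by unfold Spec_find_base_clusters_old_version; infer_instance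

-- ===== CLAIM (what is proved, stated in full; the proofs are below) =====
def Claim_equal_find_base_clusters_old_version : Prop := ∀ (cluster_dict_prev : List (Int × List Int)) (cluster_dict : List (Int × List Int)), Dom_find_base_clusters_old_version cluster_dict_prev cluster_dict → Spec_find_base_clusters_old_version cluster_dict_prev cluster_dict (find_base_clusters_old_version cluster_dict_prev cluster_dict)

-- ===== LEMMAS AND PROOFS =====

-- shorthand for B's index-building step (proof-only; the port spells it out)
def pvStepIdx (st : PySem.Dict Int (List Nat) × List Int) (oc : Int × List Int) :
    PySem.Dict Int (List Nat) × List Int :=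
  ((PySem.List.dedup oc.2).foldl
    (fun ix x => ix.modify x [] (fun l => l ++ [st.2.length])) st.1,
   st.2 ++ [oc.1])

-- the ids accumulator is just the keys in order
theorem pv_ids (prev : List (Int × List Int)) (d : PySem.Dict Int (List Nat)) (ids : List Int) :
    (prev.foldl pvStepIdx (d, ids)).2 = ids ++ prev.map Prod.fst := by
  induction prev generalizing d ids with
  | nil => simp
  | cons a l ih => simp [pvStepIdx, ih]

-- one cluster's pass over the index appends pos to exactly the members' lists
theorem pv_inner_idx (xs : List Int) (ix : PySem.Dict Int (List Nat)) (pos : Nat) (x : Int) :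
    ((xs.foldl (fun ix y => ix.modify y [] (fun l => l ++ [pos])) ix).getD x []) =
      ix.getD x [] ++ List.replicate (xs.count x) pos := by
  have h1 : (xs.foldl (fun ix y => ix.modify y [] (fun l => l ++ [pos])) ix)
      = ((xs.map (fun y => (y, pos))).foldl
          (fun d (p : Int × Nat) => d.modify p.1 [] (fun l => l ++ [p.2])) ix) := by
    rw [List.foldl_map]
  rw [h1, PySem.Dict.getD_foldl_modify_append]
  congr 1
  simp only [List.filter_map, List.map_map]
  have h2 : ((fun (p : Int × Nat) => p.1 == x) ∘ fun y => (y, pos)) = (fun y => y == x) := rfl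
  have h3 : ((fun (p : Int × Nat) => p.2) ∘ fun y => (y, pos)) = (fun _ : Int => pos) := rfl
  rw [h2, h3, List.map_const']
  congr 1
  exact Eq.symm List.count_eq_length_filter

-- index characterisation: index[x] lists the positions of previous clusters containing x
theorem pv_idx (prev : List (Int × List Int)) (x : Int) :
    ((prev.foldl pvStepIdx (PySem.Dict.empty, [])).1.getD x []) =
      (List.range prev.length).filter (fun p => decide (x ∈ (prev.getD p (0, [])).2)) := by
  induction prev using List.reverseRecOn with
  | nil => simp [PySem.Dict.getD_empty]
  | append_singleton l a ih =>
      rw [List.foldl_append, List.foldl_cons, List.foldl_nil]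
      have hpos : (l.foldl pvStepIdx (PySem.Dict.empty, [])).2.length = l.length := by
        rw [pv_ids]; simp
      have hstep : (pvStepIdx (l.foldl pvStepIdx (PySem.Dict.empty, [])) a).1.getD x []
          = (l.foldl pvStepIdx (PySem.Dict.empty, [])).1.getD x []
            ++ List.replicate ((PySem.List.dedup a.2).count x)
                 (l.foldl pvStepIdx (PySem.Dict.empty, [])).2.length :=
        pv_inner_idx _ _ _ _
      rw [hstep, hpos, ih]
      have hlen : (l ++ [a]).length = l.length + 1 := by simp
      rw [hlen, List.range_succ, List.filter_append]
      congr 1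
      · apply List.filter_congr
        intro p hp
        rw [List.mem_range] at hp
        congr 2
        rw [List.getD_append _ _ _ _ hp]
      · have hgd : ((l ++ [a]).getD l.length (0, [])) = a := by
          rw [List.getD_append_right _ _ _ _ (le_refl l.length)]
          simp
        simp only [List.filter_singleton, hgd]
        by_cases hm : x ∈ a.2
        · rw [List.count_eq_one_of_mem (PySem.List.nodup_dedup a.2)
            (by rw [PySem.List.mem_dedup]; exact hm)]
          simp [hm]
        · rw [List.count_eq_zero_of_not_mem (by rw [PySem.List.mem_dedup]; exact hm)]
          simp [hm]

-- tallying a list of positions increments each entry by its multiplicity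
theorem pv_tally_inner (ps : List Nat) (cs : List Nat) (q : Nat) (hq : q < cs.length) :
    ((ps.foldl (fun cs p => cs.set p (cs.getD p 0 + 1)) cs).getD q 0) =
      cs.getD q 0 + ps.count q := by
  induction ps generalizing cs with
  | nil => simp
  | cons p ps ih =>
      rw [List.foldl_cons, ih _ (by rw [List.length_set]; exact hq), List.count_cons]
      by_cases h : p = q
      · subst h
        have hbeq : (p == p) = true := by simp
        have hset : (cs.set p (cs.getD p 0 + 1)).getD p 0 = cs.getD p 0 + 1 := by
          simp only [List.getD_eq_getElem?_getD, List.getElem?_set]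
          simp [hq]
        rw [if_pos hbeq, hset]
        omega
      · have hbeq : ¬ ((p == q) = true) := by simp [h]
        have hset : (cs.set p (cs.getD p 0 + 1)).getD q 0 = cs.getD q 0 := by
          simp only [List.getD_eq_getElem?_getD, List.getElem?_set]
          simp [h]
        rw [if_neg hbeq, hset]
        omega

theorem pv_tally_len (ps : List Nat) (cs : List Nat) :
    (ps.foldl (fun cs p => cs.set p (cs.getD p 0 + 1)) cs).length = cs.length := by
  induction ps generalizing cs with
  | nil => rfl
  | cons p ps ih => rw [List.foldl_cons, ih, List.length_set]

-- the tallied counts are the distinct-overlap sizes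
theorem pv_counts (prev : List (Int × List Int)) (T : List Int) (cs : List Nat)
    (hlen : cs.length = prev.length) (p : Nat) (hp : p < prev.length) :
    ((T.foldl (fun cs x =>
        (((prev.foldl pvStepIdx (PySem.Dict.empty, [])).1.getD x []).foldl
          (fun cs q => cs.set q (cs.getD q 0 + 1)) cs)) cs).getD p 0) =
      cs.getD p 0 + (T.filter (fun x => decide (x ∈ (prev.getD p (0, [])).2))).length := by
  induction T generalizing cs with
  | nil => simp
  | cons x T ih =>
      rw [List.foldl_cons, ih _ (by rw [pv_tally_len]; exact hlen),
        pv_tally_inner _ _ _ (by rw [hlen]; exact hp), pv_idx, List.filter_cons]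
      have hnd : ((List.range prev.length).filter
          (fun q => decide (x ∈ (prev.getD q (0, [])).2))).Nodup :=
        List.Nodup.filter _ List.nodup_range
      by_cases hm : x ∈ (prev.getD p (0, [])).2
      · have h1 : p ∈ (List.range prev.length).filter
            (fun q => decide (x ∈ (prev.getD q (0, [])).2)) := by
          rw [List.mem_filter, List.mem_range, decide_eq_true_eq]
          exact ⟨hp, hm⟩
        rw [List.count_eq_one_of_mem hnd h1]
        have hm' : decide (x ∈ (prev.getD p (0, [])).2) = true := by
          rw [decide_eq_true_eq]; exact hm
        rw [if_pos hm', List.length_cons]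
        omega
      · have h1 : p ∉ (List.range prev.length).filter
            (fun q => decide (x ∈ (prev.getD q (0, [])).2)) := by
          rw [List.mem_filter]
          rintro ⟨-, hd⟩
          exact hm (by simpa using hd)
        rw [List.count_eq_zero_of_not_mem h1]
        have hm' : ¬ decide (x ∈ (prev.getD p (0, [])).2) = true := by
          rw [decide_eq_true_eq]; exact hm
        rw [if_neg hm']
        omega

-- |set(a) & set(b)| counted from either side
theorem pv_sym (a b : List Int) :
    (PySem.Set.inter (PySem.Set.ofList a) (PySem.Set.ofList b)).length =
      ((PySem.List.dedup b).filter (fun x => decide (x ∈ a))).length := by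
  apply List.Perm.length_eq
  refine (List.perm_ext_iff_of_nodup ?_ ?_).mpr ?_
  · exact (PySem.Set.nodup_ofList a).filter _
  · exact (PySem.Set.nodup_ofList b).filter _
  · intro x
    simp only [PySem.Set.inter, List.mem_filter, PySem.Set.mem_ofList,
      PySem.List.dedup_eq_ofList, decide_eq_true_eq, PySem.Set.contains_iff]
    tauto

-- selection folds correspond under mapping positions to ids
theorem pv_sel (c : Nat → Nat) (f : Nat → Int) (ps : List Nat) (m : Nat) (b : Option Nat) :
    ((ps.foldl (fun (st : Nat × Option Nat) p =>
        if st.1 < c p then (c p, some p) else st) (m, b)).1,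
     (ps.foldl (fun (st : Nat × Option Nat) p =>
        if st.1 < c p then (c p, some p) else st) (m, b)).2.map f) =
      (ps.map (fun p => (c p, f p))).foldl
        (fun (st : Nat × Option Int) pr => if st.1 < pr.1 then (pr.1, some pr.2) else st)
        (m, b.map f) := by
  induction ps generalizing m b with
  | nil => rfl
  | cons p ps ih =>
      by_cases h : m < c p
      · simp only [List.foldl_cons, List.map_cons, if_pos h]
        simpa using ih (c p) (some p)
      · simp only [List.foldl_cons, List.map_cons, if_neg h]
        exact ih m b

-- A's inner scan seen through (length of best intersection, best id)
theorem pv_scanA (nc2 : List Int) (prev : List (Int × List Int)) (maxi : List Int) (b : Option Int) :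
    ((prev.foldl
        (fun (st : List Int × Option Int) oc =>
          if st.1.length < (PySem.Set.inter (PySem.Set.ofList oc.2) (PySem.Set.ofList nc2)).length
          then (PySem.Set.inter (PySem.Set.ofList oc.2) (PySem.Set.ofList nc2), some oc.1)
          else st) (maxi, b)).1.length,
     (prev.foldl
        (fun (st : List Int × Option Int) oc =>
          if st.1.length < (PySem.Set.inter (PySem.Set.ofList oc.2) (PySem.Set.ofList nc2)).length
          then (PySem.Set.inter (PySem.Set.ofList oc.2) (PySem.Set.ofList nc2), some oc.1)
          else st) (maxi, b)).2) =
      (prev.map (fun oc =>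
          ((PySem.Set.inter (PySem.Set.ofList oc.2) (PySem.Set.ofList nc2)).length, oc.1))).foldl
        (fun (st : Nat × Option Int) pr => if st.1 < pr.1 then (pr.1, some pr.2) else st)
        (maxi.length, b) := by
  induction prev generalizing maxi b with
  | nil => rfl
  | cons a l ih =>
      by_cases h : maxi.length < (PySem.Set.inter (PySem.Set.ofList a.2) (PySem.Set.ofList nc2)).length
      · simp only [List.foldl_cons, List.map_cons, if_pos h]
        exact ih (PySem.Set.inter (PySem.Set.ofList a.2) (PySem.Set.ofList nc2)) (some a.1)
      · simp only [List.foldl_cons, List.map_cons, if_neg h]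
        exact ih maxi b

-- mapping over range-with-getD is mapping over the list
theorem pv_map_range {β : Type} (l : List (Int × List Int)) (h : (Int × List Int) → β) :
    (List.range l.length).map (fun p => h (l.getD p (0, []))) = l.map h := by
  apply List.ext_getElem
  · simp
  · intro i h1 h2
    simp only [List.getElem_map, List.getElem_range, List.getD_eq_getElem?_getD]
    have h3 : i < l.length := by simpa using h2
    rw [List.getElem?_eq_getElem h3]
    rfl

-- per-new-cluster step: A's pairwise scan and B's tally-and-select insert the same entry
theorem pv_step (prev : List (Int × List Int)) (nc : Int × List Int) (base : PySem.Dict Int Int) :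
    (match (prev.foldl
        (fun (st : List Int × Option Int) oc =>
          if st.1.length < (PySem.Set.inter (PySem.Set.ofList oc.2) (PySem.Set.ofList nc.2)).length
          then (PySem.Set.inter (PySem.Set.ofList oc.2) (PySem.Set.ofList nc.2), some oc.1)
          else st)
        ([], none)).2 with
     | some b => base.insert b nc.1
     | none => base) =
    (match ((List.range (prev.foldl pvStepIdx (PySem.Dict.empty, [])).2.length).foldl
        (fun (st : Nat × Option Nat) p =>
          if st.1 < ((PySem.List.dedup nc.2).foldl
              (fun cs x => (((prev.foldl pvStepIdx (PySem.Dict.empty, [])).1.getD x []).foldl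
                (fun cs q => cs.set q (cs.getD q 0 + 1)) cs))
              (List.replicate (prev.foldl pvStepIdx (PySem.Dict.empty, [])).2.length 0)).getD p 0
          then (((PySem.List.dedup nc.2).foldl
              (fun cs x => (((prev.foldl pvStepIdx (PySem.Dict.empty, [])).1.getD x []).foldl
                (fun cs q => cs.set q (cs.getD q 0 + 1)) cs))
              (List.replicate (prev.foldl pvStepIdx (PySem.Dict.empty, [])).2.length 0)).getD p 0,
            some p)
          else st) (0, none)).2 with
     | some p => base.insert ((prev.foldl pvStepIdx (PySem.Dict.empty, [])).2.getD p 0) nc.1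
     | none => base) := by
  set S := prev.foldl pvStepIdx (PySem.Dict.empty, []) with hS
  have hids : S.2 = prev.map Prod.fst := by
    rw [hS]; simpa using pv_ids prev PySem.Dict.empty []
  have hn : S.2.length = prev.length := by rw [hids, List.length_map]
  set counts := (PySem.List.dedup nc.2).foldl
      (fun cs x => ((S.1.getD x []).foldl
        (fun cs q => cs.set q (cs.getD q 0 + 1)) cs))
      (List.replicate S.2.length 0) with hcounts
  set sel := (List.range S.2.length).foldl
      (fun (st : Nat × Option Nat) p =>
        if st.1 < counts.getD p 0 then (counts.getD p 0, some p) else st)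
      (0, none) with hsel
  set rA := prev.foldl
      (fun (st : List Int × Option Int) oc =>
        if st.1.length < (PySem.Set.inter (PySem.Set.ofList oc.2) (PySem.Set.ofList nc.2)).length
        then (PySem.Set.inter (PySem.Set.ofList oc.2) (PySem.Set.ofList nc.2), some oc.1)
        else st)
      ([], none) with hrA
  have hc : ∀ p, p < prev.length → counts.getD p 0 =
      (PySem.Set.inter (PySem.Set.ofList (prev.getD p (0, [])).2) (PySem.Set.ofList nc.2)).length := by
    intro p hp
    have e1 : counts.getD p 0 = (List.replicate S.2.length (0 : Nat)).getD p 0 +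
        ((PySem.List.dedup nc.2).filter (fun x => decide (x ∈ (prev.getD p (0, [])).2))).length :=
      pv_counts prev (PySem.List.dedup nc.2) (List.replicate S.2.length 0)
        (by rw [List.length_replicate, hn]) p hp
    have e2 : (List.replicate S.2.length (0 : Nat)).getD p 0 = 0 := by
      simp only [List.getD_eq_getElem?_getD, List.getElem?_replicate]
      split_ifs <;> rfl
    rw [e1, e2, Nat.zero_add]
    exact (pv_sym _ _).symm
  have hmap : (List.range S.2.length).map (fun p => (counts.getD p 0, S.2.getD p 0)) =
      prev.map (fun oc =>
        ((PySem.Set.inter (PySem.Set.ofList oc.2) (PySem.Set.ofList nc.2)).length, oc.1)) := by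
    rw [hn]
    calc (List.range prev.length).map (fun p => (counts.getD p 0, S.2.getD p 0))
        = (List.range prev.length).map (fun p =>
            ((PySem.Set.inter (PySem.Set.ofList (prev.getD p (0, [])).2)
                (PySem.Set.ofList nc.2)).length,
             (prev.getD p (0, [])).1)) := by
          apply List.map_congr_left
          intro p hp
          rw [List.mem_range] at hp
          have e1 := hc p hp
          have e2 : S.2.getD p 0 = (prev.getD p (0, [])).1 := by
            rw [hids]
            simp only [List.getD_eq_getElem?_getD, List.getElem?_map]
            rw [List.getElem?_eq_getElem hp]
            rfl
          rw [e1, e2]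
      _ = prev.map (fun oc =>
            ((PySem.Set.inter (PySem.Set.ofList oc.2) (PySem.Set.ofList nc.2)).length, oc.1)) :=
          pv_map_range prev (fun oc =>
            ((PySem.Set.inter (PySem.Set.ofList oc.2) (PySem.Set.ofList nc.2)).length, oc.1))
  have h1 : (sel.1, sel.2.map (fun p => S.2.getD p 0)) =
      (prev.map (fun oc =>
        ((PySem.Set.inter (PySem.Set.ofList oc.2) (PySem.Set.ofList nc.2)).length, oc.1))).foldl
        (fun (st : Nat × Option Int) pr => if st.1 < pr.1 then (pr.1, some pr.2) else st)
        (0, none) := by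
    calc (sel.1, sel.2.map (fun p => S.2.getD p 0))
        = ((List.range S.2.length).map (fun p => (counts.getD p 0, S.2.getD p 0))).foldl
            (fun (st : Nat × Option Int) pr => if st.1 < pr.1 then (pr.1, some pr.2) else st)
            (0, none) :=
          pv_sel (fun p => counts.getD p 0) (fun p => S.2.getD p 0)
            (List.range S.2.length) 0 none
      _ = _ := by rw [hmap]
  have h2 : (rA.1.length, rA.2) =
      (prev.map (fun oc =>
        ((PySem.Set.inter (PySem.Set.ofList oc.2) (PySem.Set.ofList nc.2)).length, oc.1))).foldl
        (fun (st : Nat × Option Int) pr => if st.1 < pr.1 then (pr.1, some pr.2) else st)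
        (0, none) :=
    pv_scanA nc.2 prev [] none
  have hopt : rA.2 = sel.2.map (fun p => S.2.getD p 0) :=
    (congrArg Prod.snd (h1.trans h2.symm)).symm
  rw [hopt]
  cases sel.2 <;> rfl

-- ===== VERDICT (by name: the statement is the Claim_ definition above) =====
theorem find_base_clusters_old_version_spec : Claim_equal_find_base_clusters_old_version := by
  intro prev new _
  unfold Spec_find_base_clusters_old_version
  show (new.foldl (fun base nc =>
      match (prev.foldl
          (fun (st : List Int × Option Int) oc =>
            if st.1.length < (PySem.Set.inter (PySem.Set.ofList oc.2) (PySem.Set.ofList nc.2)).length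
            then (PySem.Set.inter (PySem.Set.ofList oc.2) (PySem.Set.ofList nc.2), some oc.1)
            else st)
          ([], none)).2 with
      | some b => base.insert b nc.1
      | none => base) PySem.Dict.empty).items =
    (new.foldl (fun base nc =>
      match ((List.range (prev.foldl pvStepIdx (PySem.Dict.empty, [])).2.length).foldl
          (fun (st : Nat × Option Nat) p =>
            if st.1 < ((PySem.List.dedup nc.2).foldl
                (fun cs x => (((prev.foldl pvStepIdx (PySem.Dict.empty, [])).1.getD x []).foldl
                  (fun cs q => cs.set q (cs.getD q 0 + 1)) cs))
                (List.replicate (prev.foldl pvStepIdx (PySem.Dict.empty, [])).2.length 0)).getD p 0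
            then (((PySem.List.dedup nc.2).foldl
                (fun cs x => (((prev.foldl pvStepIdx (PySem.Dict.empty, [])).1.getD x []).foldl
                  (fun cs q => cs.set q (cs.getD q 0 + 1)) cs))
                (List.replicate (prev.foldl pvStepIdx (PySem.Dict.empty, [])).2.length 0)).getD p 0,
              some p)
            else st) (0, none)).2 with
      | some p => base.insert ((prev.foldl pvStepIdx (PySem.Dict.empty, [])).2.getD p 0) nc.1
      | none => base) PySem.Dict.empty).items
  have hfun : (fun (base : PySem.Dict Int Int) (nc : Int × List Int) =>
      match (prev.foldl
          (fun (st : List Int × Option Int) oc =>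
            if st.1.length < (PySem.Set.inter (PySem.Set.ofList oc.2) (PySem.Set.ofList nc.2)).length
            then (PySem.Set.inter (PySem.Set.ofList oc.2) (PySem.Set.ofList nc.2), some oc.1)
            else st)
          ([], none)).2 with
      | some b => base.insert b nc.1
      | none => base) =
    (fun (base : PySem.Dict Int Int) (nc : Int × List Int) =>
      match ((List.range (prev.foldl pvStepIdx (PySem.Dict.empty, [])).2.length).foldl
          (fun (st : Nat × Option Nat) p =>
            if st.1 < ((PySem.List.dedup nc.2).foldl
                (fun cs x => (((prev.foldl pvStepIdx (PySem.Dict.empty, [])).1.getD x []).foldl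
                  (fun cs q => cs.set q (cs.getD q 0 + 1)) cs))
                (List.replicate (prev.foldl pvStepIdx (PySem.Dict.empty, [])).2.length 0)).getD p 0
            then (((PySem.List.dedup nc.2).foldl
                (fun cs x => (((prev.foldl pvStepIdx (PySem.Dict.empty, [])).1.getD x []).foldl
                  (fun cs q => cs.set q (cs.getD q 0 + 1)) cs))
                (List.replicate (prev.foldl pvStepIdx (PySem.Dict.empty, [])).2.length 0)).getD p 0,
              some p)
            else st) (0, none)).2 with
      | some p => base.insert ((prev.foldl pvStepIdx (PySem.Dict.empty, [])).2.getD p 0) nc.1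
      | none => base) := by
    funext base nc
    exact pv_step prev nc base
  rw [hfun]
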